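-- pv_equiv track=rewrite | github.com/KosinskiLab/AlphaPulldown | alphapulldown/utils/file_handling.py | convert_fasta_description_to_protein_name
-- ===== SOURCE A (Python) =====
-- def convert_fasta_description_to_protein_name(line):
--     line = line.replace(" ", "_")
--     unwanted_symbols = ["|", "=", "&", "*", "@", "#", "`", ":", ";", "$", "?"]
--     for symbol in unwanted_symbols:
--         if symbol in line:
--             line = line.replace(symbol, "_")
--     if line.startswith(">"):
--         return line[1:]  # Remove the '>' at the beginning.
--     else:
--         return line
-- ===== SOURCE B (Python) =====
-- _BAD = frozenset(' |=&*@#`:;$?')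
--
--
-- def convert_fasta_description_to_protein_name(line):
--     if line.startswith(">"):
--         line = line[1:]
--     return "".join("_" if c in _BAD else c for c in line)
-- ===== Notes on version B (the rewrite author's own statement) =====
-- stated objective: simpler
-- what changed: Instead of twelve full replace passes over the string (one per unwanted symbol), B removes the leading FASTA marker first and then builds the result in a single left-to-right pass, mapping each character through a frozenset membership test.
import Mathlib
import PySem

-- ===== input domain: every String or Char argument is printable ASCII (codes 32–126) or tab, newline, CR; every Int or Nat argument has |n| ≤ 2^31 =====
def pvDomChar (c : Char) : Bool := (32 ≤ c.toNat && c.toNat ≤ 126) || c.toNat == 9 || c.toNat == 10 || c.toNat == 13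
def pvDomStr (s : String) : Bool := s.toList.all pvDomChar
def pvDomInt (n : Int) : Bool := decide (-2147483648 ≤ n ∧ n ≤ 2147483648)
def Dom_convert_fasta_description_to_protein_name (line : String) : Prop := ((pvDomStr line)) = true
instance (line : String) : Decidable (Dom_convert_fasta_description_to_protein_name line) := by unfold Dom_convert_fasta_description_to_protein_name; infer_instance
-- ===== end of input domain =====

-- B replaces A's twelve whole-string replace passes by one left-to-right pass with a
-- set membership test (objective: simpler).

-- ===== PORT A =====
def convert_fasta_description_to_protein_name (line : String) : String :=
  let line1 := PySem.Str.replace line " " "_"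
  let line2 := ["|", "=", "&", "*", "@", "#", "`", ":", ";", "$", "?"].foldl
    (fun l sym => if PySem.Str.isIn sym l then PySem.Str.replace l sym "_" else l) line1
  if PySem.Str.startswith line2 ">" then PySem.Str.slice line2 (some 1) none else line2

-- ===== PORT B =====
-- the frozenset ' |=&*@#`:;$?' of B
def pvBadChars : List Char := [' ', '|', '=', '&', '*', '@', '#', '`', ':', ';', '$', '?']

def convert_fasta_description_to_protein_name_alt (line : String) : String :=
  let cs := if PySem.Str.startswith line ">" then line.toList.drop 1 else line.toList
  String.ofList (cs.map (fun c => if pvBadChars.contains c then '_' else c))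

-- ===== PRECONDITION & SPEC =====
def Spec_convert_fasta_description_to_protein_name (line : String) (out : String) : Prop := out = convert_fasta_description_to_protein_name_alt line
instance (line : String) (out : String) : Decidable (Spec_convert_fasta_description_to_protein_name line out) := by unfold Spec_convert_fasta_description_to_protein_name; infer_instance

-- ===== CLAIM (what is proved, stated in full; the proofs are below) =====
def Claim_equal_convert_fasta_description_to_protein_name : Prop := ∀ (line : String), Dom_convert_fasta_description_to_protein_name line → Spec_convert_fasta_description_to_protein_name line (convert_fasta_description_to_protein_name line)

-- ===== LEMMAS AND PROOFS =====

-- str.replace with a single-char pattern and single-char replacement is a per-char map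
theorem pv_go_single (c n : Char) : ∀ (l acc : List Char) (fuel : Nat), l.length ≤ fuel →
    PySem.Chars.replace.go [c] [n] fuel l acc = acc.reverse ++ l.map (fun x => if x = c then n else x) := by
  intro l
  induction l with
  | nil => intro acc fuel h; cases fuel <;> simp [PySem.Chars.replace.go]
  | cons x t ih =>
    intro acc fuel h
    cases fuel with
    | zero => simp at h
    | succ f =>
      simp only [PySem.Chars.replace.go]
      by_cases hx : x = c
      · subst hx
        simp [List.isPrefixOf, ih _ f (by simpa using h)]
      · simp [List.isPrefixOf, hx, Ne.symm hx, ih _ f (by simpa using h)]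

theorem pv_replace_single (s : List Char) (c n : Char) :
    PySem.Chars.replace s [c] [n] = s.map (fun x => if x = c then n else x) := by
  simp [PySem.Chars.replace, pv_go_single c n s [] s.length (le_refl _)]

-- one step of A's loop, at the character level (the `if sym in l` guard is immaterial:
-- when sym is absent the map is the identity)
theorem pv_step (l sym : String) (c : Char) (h : sym.toList = [c]) :
    (if PySem.Str.isIn sym l then PySem.Str.replace l sym "_" else l).toList
      = l.toList.map (fun x => if x = c then '_' else x) := by
  by_cases hin : PySem.Str.isIn sym l
  · rw [if_pos hin, PySem.Str.toList_replace, h,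
        show ("_" : String).toList = ['_'] from rfl, pv_replace_single]
  · have hnot : c ∉ l.toList := by
      intro hc
      exact hin (((PySem.Str.isIn_iff_infix sym l)).2
        (by rw [h]; exact (List.singleton_infix_iff c l.toList).mpr hc))
    rw [if_neg hin]
    symm
    calc l.toList.map (fun x => if x = c then '_' else x)
        = l.toList.map id := List.map_congr_left (fun x hx => by
          have : x ≠ c := fun he => hnot (he ▸ hx)
          simp [this])
      _ = l.toList := List.map_id _

-- the per-character action of A's whole replace chain
def pvG (x : Char) : Char := if pvBadChars.contains x then '_' else x

-- the whole symbol loop of A, for any list of single-character symbols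
theorem pv_chain : ∀ (syms : List String) (s : String),
    (∀ sym ∈ syms, ∃ c : Char, sym.toList = [c]) →
    (syms.foldl (fun l sym => if PySem.Str.isIn sym l then PySem.Str.replace l sym "_" else l) s).toList
      = s.toList.map (fun x => if syms.any (fun sym => sym.toList == [x]) then '_' else x) := by
  intro syms
  induction syms with
  | nil => intro s _; simp
  | cons sym t ih =>
    intro s h
    obtain ⟨c, hc⟩ := h sym (List.mem_cons_self ..)
    simp only [List.foldl_cons]
    rw [ih _ (fun z hz => h z (List.mem_cons_of_mem _ hz)), pv_step s sym c hc, List.map_map]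
    refine List.map_congr_left (fun x _ => ?_)
    simp only [Function.comp_apply, List.any_cons, hc]
    by_cases hx : x = c
    · subst hx
      simp
    · have : ([c] == [x]) = false := by
        simp [Ne.symm hx]
      simp [hx, this]

theorem pv_line2_chars (line : String) :
    (["|", "=", "&", "*", "@", "#", "`", ":", ";", "$", "?"].foldl
        (fun l sym => if PySem.Str.isIn sym l then PySem.Str.replace l sym "_" else l)
        (PySem.Str.replace line " " "_")).toList = line.toList.map pvG := by
  rw [pv_chain _ _ (by
    intro sym hsym
    simp only [List.mem_cons, List.not_mem_nil, or_false] at hsym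
    rcases hsym with h|h|h|h|h|h|h|h|h|h|h <;> subst h <;> exact ⟨_, rfl⟩)]
  rw [show (PySem.Str.replace line " " "_").toList
        = line.toList.map (fun x => if x = ' ' then '_' else x) from by
      rw [PySem.Str.toList_replace]
      exact pv_replace_single line.toList ' ' '_', List.map_map]
  refine List.map_congr_left (fun x _ => ?_)
  simp only [Function.comp_apply]
  by_cases hsp : x = ' '
  · subst hsp; decide
  · rw [if_neg hsp]
    by_cases hm : pvBadChars.contains x = true
    · have : x ∈ pvBadChars := by simpa [List.contains_eq_mem] using hm
      simp only [pvBadChars, List.mem_cons, List.not_mem_nil, or_false] at this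
      rcases this with h|h|h|h|h|h|h|h|h|h|h|h <;> first | (exact absurd h hsp) | (subst h; decide)
    · have hx : pvG x = x := by unfold pvG; rw [if_neg (by simpa using hm)]
      rw [hx]
      have : x ∉ pvBadChars := by simpa [List.contains_eq_mem] using hm
      simp only [pvBadChars, List.mem_cons, List.not_mem_nil, or_false, not_or] at this
      obtain ⟨h1,h2,h3,h4,h5,h6,h7,h8,h9,h10,h11,h12⟩ := this
      have e : (["|", "=", "&", "*", "@", "#", "`", ":", ";", "$", "?"].any
          (fun sym => sym.toList == [x])) = false := by
        simp [List.any_cons, Ne.symm h2, Ne.symm h3, Ne.symm h4, Ne.symm h5, Ne.symm h6,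
          Ne.symm h7, Ne.symm h8, Ne.symm h9, Ne.symm h10, Ne.symm h11, Ne.symm h12]
      rw [e]
      rfl

-- pvG moves no character onto '>' and fixes '>', so the leading-'>' test commutes with it
theorem pv_starts (cs : List Char) :
    PySem.Chars.startswith (cs.map pvG) ['>'] = PySem.Chars.startswith cs ['>'] := by
  cases cs with
  | nil => rfl
  | cons x t =>
    simp only [PySem.Chars.startswith, List.map, List.isPrefixOf,
      Bool.and_true]
    by_cases h : x = '>'
    · subst h; rfl
    · have hg : pvG x ≠ '>' := by
        unfold pvG; split
        · decide
        · exact h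
      rw [show ('>' == x) = false from beq_eq_false_iff_ne.mpr (Ne.symm h),
          show ('>' == pvG x) = false from beq_eq_false_iff_ne.mpr (Ne.symm hg)]

-- ===== VERDICT (by name: the statement is the Claim_ definition above) =====
theorem convert_fasta_description_to_protein_name_spec : Claim_equal_convert_fasta_description_to_protein_name := by
  intro line _
  unfold Spec_convert_fasta_description_to_protein_name
  unfold convert_fasta_description_to_protein_name convert_fasta_description_to_protein_name_alt
  have h2 := pv_line2_chars line
  have hsw : PySem.Str.startswith
      (["|", "=", "&", "*", "@", "#", "`", ":", ";", "$", "?"].foldl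
        (fun l sym => if PySem.Str.isIn sym l then PySem.Str.replace l sym "_" else l)
        (PySem.Str.replace line " " "_")) ">" = PySem.Str.startswith line ">" := by
    rw [PySem.Str.startswith_eq, PySem.Str.startswith_eq,
        show (">" : String).toList = ['>'] from rfl, h2, pv_starts]
  rw [← String.toList_inj]
  simp only [hsw]
  cases hB : PySem.Str.startswith line ">"
  · rw [if_neg Bool.false_ne_true, if_neg Bool.false_ne_true, h2,
        show ∀ l : List Char, (String.ofList l).toList = l from fun l => by simp]
    rfl
  · rw [if_pos rfl, if_pos rfl, PySem.Str.toList_slice]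
    show PySem.List.slice _ (some 1) none = _
    rw [PySem.List.slice_from _ (a := 1) (by norm_num), h2,
        show ∀ l : List Char, (String.ofList l).toList = l from fun l => by simp]
    show (line.toList.map pvG).drop 1 = (line.toList.drop 1).map pvG
    simp
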